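-- pv_equiv track=rewrite | github.com/GaloisInc/SocialCyberLAGOON | lagoon/fusion/transformations.py | process_initials
-- ===== SOURCE A (Python) =====
-- def process_initials(name):
--     if len(name) <= 1:
--         return name
--
--     capitals = "ABCDEFGHIJKLMNOPQRSTUVWXYZ"
--     output = ""
--     i = 0
--     while i < len(name):
--         if i==0:
--             if name[i] in capitals and name[i+1] == ".":
--                 output += (name[i] + ' ')
--                 i += 2
--             else:
--                 output += name[i]
--                 i += 1
--         elif i != len(name)-1:
--             if name[i-1] not in capitals and name[i] in capitals and name[i+1] == ".":
--                 output += (name[i] + ' ')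
--                 i += 2
--             else:
--                 output += name[i]
--                 i += 1
--         else:
--             output += name[i]
--             i += 1
--     output = output.replace("  ", " ")
--     return output
-- ===== SOURCE B (Python) =====
-- def process_initials(name):
--     if len(name) <= 1:
--         return name
--
--     capitals = "ABCDEFGHIJKLMNOPQRSTUVWXYZ"
--     # Split on '.', then decide each boundary locally from the segment before it:
--     # a period is turned into a space exactly when the segment before it ends in a
--     # single capital not preceded by another capital (segment of length 1 sits after
--     # a period or the string start, neither of which is a capital).
--     parts = name.split(".")
--     pieces = [parts[0]]
--     for j in range(1, len(parts)):
--         prev = parts[j - 1]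
--         if prev and prev[-1] in capitals and (len(prev) == 1 or prev[-2] not in capitals):
--             pieces.append(" ")
--         else:
--             pieces.append(".")
--         pieces.append(parts[j])
--     return "".join(pieces).replace("  ", " ")
-- ===== Notes on version B (the rewrite author's own statement) =====
-- stated objective: faster
-- what changed: Replaced the index-based while-loop state machine that consumes characters one by one into a string built by += with a single split on the period character, deciding each boundary locally from the last one or two characters of the preceding segment and rejoining all pieces at once.
import Mathlib
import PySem

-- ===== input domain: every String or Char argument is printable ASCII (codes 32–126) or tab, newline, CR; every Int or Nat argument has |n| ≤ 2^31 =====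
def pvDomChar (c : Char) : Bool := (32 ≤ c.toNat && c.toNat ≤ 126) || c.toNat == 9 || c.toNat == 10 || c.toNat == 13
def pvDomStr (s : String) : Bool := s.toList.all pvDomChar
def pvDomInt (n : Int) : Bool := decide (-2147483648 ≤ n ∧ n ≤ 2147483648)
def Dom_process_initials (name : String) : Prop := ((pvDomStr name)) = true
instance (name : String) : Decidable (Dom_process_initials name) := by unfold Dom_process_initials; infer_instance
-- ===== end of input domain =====

-- B replaces A's index-based while-loop state machine (which consumes characters and
-- skips over matched periods) by a split-on-'.' pass deciding each period boundary
-- locally from the end of the preceding segment, rejoined once. Equality of the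
-- return value is proved for every string.

-- ===== PORT A =====
-- A's capitals string, as its character list.
def pvCapsA : List Char := "ABCDEFGHIJKLMNOPQRSTUVWXYZ".toList

-- A's while-loop: indices i into the char list. All indexing in A is in range on the
-- executed branches (guaranteed by the guards), so List.getD is exact here.
def pvLoopA (cs : List Char) (i : Nat) (output : List Char) : List Char :=
  if _h : i < cs.length then
    if i = 0 then
      if pvCapsA.contains (cs.getD i ' ') && (cs.getD (i+1) ' ' == '.') then
        pvLoopA cs (i+2) (output ++ [cs.getD i ' ', ' '])
      else
        pvLoopA cs (i+1) (output ++ [cs.getD i ' '])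
    else if i ≠ cs.length - 1 then
      if !pvCapsA.contains (cs.getD (i-1) ' ') && pvCapsA.contains (cs.getD i ' ')
          && (cs.getD (i+1) ' ' == '.') then
        pvLoopA cs (i+2) (output ++ [cs.getD i ' ', ' '])
      else
        pvLoopA cs (i+1) (output ++ [cs.getD i ' '])
    else
      pvLoopA cs (i+1) (output ++ [cs.getD i ' '])
  else output
termination_by cs.length - i
decreasing_by all_goals omega

def process_initials (name : String) : String :=
  if PySem.Str.len name ≤ 1 then name
  else PySem.Str.replace (String.ofList (pvLoopA name.toList 0 [])) "  " " "

-- ===== PORT B =====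
def pvCapsB : List Char := "ABCDEFGHIJKLMNOPQRSTUVWXYZ".toList

-- Source B's per-boundary decision: the separator written in place of a '.', from the
-- segment before it (prev and prev[-1] in capitals and (len(prev)==1 or prev[-2] not in capitals)).
def pvSepB (prev : List Char) : Char :=
  if decide (prev ≠ []) && pvCapsB.contains (prev.getD (prev.length - 1) ' ')
      && (prev.length == 1 || !pvCapsB.contains (prev.getD (prev.length - 2) ' ')) then ' '
  else '.'

-- Source B's join loop: parts[0], then for each later part the separator decided from the
-- part before it, then the part.
def pvJoinB : List (List Char) → List Char
  | [] => []
  | [p] => p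
  | p :: q :: rest => p ++ pvSepB p :: pvJoinB (q :: rest)

def process_initials_alt (name : String) : String :=
  if PySem.Str.len name ≤ 1 then name
  else PySem.Str.replace (String.ofList (pvJoinB (name.toList.splitOn '.'))) "  " " "

-- ===== PRECONDITION & SPEC =====
def Spec_process_initials (name : String) (out : String) : Prop := out = process_initials_alt name
instance (name : String) (out : String) : Decidable (Spec_process_initials name out) := by unfold Spec_process_initials; infer_instance

-- ===== CLAIM (what is proved, stated in full; the proofs are below) =====
def Claim_equal_process_initials : Prop := ∀ (name : String), Dom_process_initials name → Spec_process_initials name (process_initials name)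

-- ===== LEMMAS AND PROOFS =====

-- Is the optional previous character a capital? (none = start of string)
def pvCapOpt : Option Char → Bool
  | none => false
  | some p => pvCapsA.contains p

-- Structural intermediate form of A's loop: recursion on the character list carrying
-- the previous ORIGINAL character.
def pvGoChar : List Char → Option Char → List Char
  | [], _ => []
  | [c], _ => [c]
  | c :: d :: rest, prev =>
    if pvCapsA.contains c && (d == '.') && !pvCapOpt prev then
      c :: ' ' :: pvGoChar rest (some '.')
    else
      c :: pvGoChar (d :: rest) (some c)

-- "the segment p, entered with previous character prev, ends in a match": its last
-- character is a capital whose predecessor (inside p, or prev) is not a capital.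
def pvMatchEnd : Option Char → List Char → Bool
  | _, [] => false
  | prev, [c] => pvCapsA.contains c && !pvCapOpt prev
  | _, c :: c' :: p => pvMatchEnd (some c) (c' :: p)

-- joinM: pvJoinB with the head separator decided by pvMatchEnd with explicit prev.
def pvJoinM : Option Char → List (List Char) → List Char
  | _, [] => []
  | _, [p] => p
  | prev, p :: q :: rest =>
      p ++ (if pvMatchEnd prev p then ' ' else '.') :: pvJoinM (some '.') (q :: rest)

-- ---- Step 1: A's index loop equals the structural recursion. ----

def pvPrevAt (cs : List Char) (i : Nat) : Option Char :=
  if i = 0 then none else some (cs.getD (i-1) ' ')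

lemma pvDrop_cons (cs : List Char) (i : Nat) (h : i < cs.length) :
    cs.drop i = cs.getD i ' ' :: cs.drop (i+1) := by
  rw [List.getD_eq_getElem cs ' ' h]
  exact (List.drop_eq_getElem_cons h)

lemma pvLoopA_eq_goChar (n : Nat) : ∀ (cs : List Char) (i : Nat) (out : List Char),
    cs.length - i = n →
    pvLoopA cs i out = out ++ pvGoChar (cs.drop i) (pvPrevAt cs i) := by
  induction n using Nat.strong_induction_on with
  | _ n ih =>
    intro cs i out hn
    by_cases hlt : i < cs.length
    · have hd : cs.drop i = cs.getD i ' ' :: cs.drop (i+1) := pvDrop_cons cs i hlt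
      by_cases hlast : i = cs.length - 1
      · -- last index: one character remains
        have hnil : cs.drop (i+1) = [] := by
          apply List.drop_eq_nil_of_le; omega
        rw [pvLoopA, dif_pos hlt]
        have hget1 : cs.getD (i+1) ' ' = ' ' := by
          apply List.getD_eq_default; omega
        have htail : pvLoopA cs (i+1) (out ++ [cs.getD i ' ']) = out ++ [cs.getD i ' '] := by
          rw [pvLoopA, dif_neg (by omega : ¬ i + 1 < cs.length)]
        have hrhs : pvGoChar (cs.drop i) (pvPrevAt cs i) = [cs.getD i ' '] := by
          rw [hd, hnil]; rfl
        by_cases h0 : i = 0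
        · rw [if_pos h0]
          have : (pvCapsA.contains (cs.getD i ' ') && (cs.getD (i+1) ' ' == '.')) = false := by
            rw [hget1]; simp
          rw [this, if_neg (by simp), htail, hrhs]
        · rw [if_neg h0, if_neg (by omega : ¬ i ≠ cs.length - 1), htail, hrhs]
      · -- i < len - 1 : two characters remain
        have hlt1 : i + 1 < cs.length := by omega
        have hd1 : cs.drop (i+1) = cs.getD (i+1) ' ' :: cs.drop (i+2) := pvDrop_cons cs (i+1) hlt1
        have hform : pvGoChar (cs.drop i) (pvPrevAt cs i)
            = if pvCapsA.contains (cs.getD i ' ') && (cs.getD (i+1) ' ' == '.')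
                  && !pvCapOpt (pvPrevAt cs i) then
                cs.getD i ' ' :: ' ' :: pvGoChar (cs.drop (i+2)) (some '.')
              else
                cs.getD i ' ' :: pvGoChar (cs.getD (i+1) ' ' :: cs.drop (i+2)) (some (cs.getD i ' ')) := by
          rw [hd, hd1]; rfl
        rw [pvLoopA, dif_pos hlt]
        by_cases h0 : i = 0
        · rw [if_pos h0]
          have hprev : pvPrevAt cs i = none := by subst h0; rfl
          have hcond : (pvCapsA.contains (cs.getD i ' ') && (cs.getD (i+1) ' ' == '.')
                && !pvCapOpt (pvPrevAt cs i))
              = (pvCapsA.contains (cs.getD i ' ') && (cs.getD (i+1) ' ' == '.')) := by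
            rw [hprev]; cases pvCapsA.contains (cs.getD i ' ') <;> cases cs.getD (i+1) ' ' == '.' <;> rfl
          by_cases hc : (pvCapsA.contains (cs.getD i ' ') && (cs.getD (i+1) ' ' == '.')) = true
          · rw [if_pos hc, hform, hcond, if_pos hc]
            rw [ih _ (by omega) cs (i+2) _ rfl]
            have hdot : cs.getD (i+1) ' ' = '.' := by
              simp only [Bool.and_eq_true, beq_iff_eq] at hc; exact hc.2
            have : pvPrevAt cs (i+2) = some '.' := by
              unfold pvPrevAt; rw [if_neg (by omega)]
              rw [(by omega : i + 2 - 1 = i + 1), hdot]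
            rw [this]; simp
          · rw [if_neg hc, hform, hcond, if_neg hc]
            rw [ih _ (by omega) cs (i+1) _ rfl]
            have : pvPrevAt cs (i+1) = some (cs.getD i ' ') := by
              unfold pvPrevAt; rw [if_neg (by omega), (by omega : i + 1 - 1 = i)]
            rw [this, hd1]; simp
        · rw [if_neg h0, if_pos (by omega : i ≠ cs.length - 1)]
          have hprev : pvPrevAt cs i = some (cs.getD (i-1) ' ') := by
            unfold pvPrevAt; rw [if_neg h0]
          have hcond : (pvCapsA.contains (cs.getD i ' ') && (cs.getD (i+1) ' ' == '.')
                && !pvCapOpt (pvPrevAt cs i))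
              = (!pvCapsA.contains (cs.getD (i-1) ' ') && pvCapsA.contains (cs.getD i ' ')
                && (cs.getD (i+1) ' ' == '.')) := by
            rw [hprev]
            show (pvCapsA.contains (cs.getD i ' ') && (cs.getD (i+1) ' ' == '.')
                && !pvCapsA.contains (cs.getD (i-1) ' ')) = _
            cases pvCapsA.contains (cs.getD i ' ') <;> cases cs.getD (i+1) ' ' == '.'
              <;> cases pvCapsA.contains (cs.getD (i-1) ' ') <;> rfl
          by_cases hc : (!pvCapsA.contains (cs.getD (i-1) ' ') && pvCapsA.contains (cs.getD i ' ')
                && (cs.getD (i+1) ' ' == '.')) = true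
          · rw [if_pos hc, hform, hcond, if_pos hc]
            rw [ih _ (by omega) cs (i+2) _ rfl]
            have hdot : cs.getD (i+1) ' ' = '.' := by
              simp only [Bool.and_eq_true, beq_iff_eq] at hc; exact hc.2
            have : pvPrevAt cs (i+2) = some '.' := by
              unfold pvPrevAt; rw [if_neg (by omega)]
              rw [(by omega : i + 2 - 1 = i + 1), hdot]
            rw [this]; simp
          · rw [if_neg hc, hform, hcond, if_neg hc]
            rw [ih _ (by omega) cs (i+1) _ rfl]
            have : pvPrevAt cs (i+1) = some (cs.getD i ' ') := by
              unfold pvPrevAt; rw [if_neg (by omega), (by omega : i + 1 - 1 = i)]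
            rw [this, hd1]; simp
    · rw [pvLoopA, dif_neg hlt]
      rw [List.drop_eq_nil_of_le (by omega)]
      cases pvPrevAt cs i <;> simp [pvGoChar]

-- ---- Step 2: the structural recursion equals the split-and-rejoin (with explicit prev). ----

lemma pvSplitOn_ne_nil (cs : List Char) : cs.splitOn '.' ≠ [] :=
  List.splitOnP_ne_nil _ cs

lemma pvGoChar_eq_joinM (n : Nat) : ∀ (cs : List Char) (prev : Option Char),
    cs.length = n →
    pvGoChar cs prev = pvJoinM prev (cs.splitOn '.') := by
  induction n using Nat.strong_induction_on with
  | _ n ih =>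
    intro cs prev hn
    match cs with
    | [] => simp [pvGoChar, List.splitOn_nil, pvJoinM]
    | c :: rest =>
      have hsplit : (c :: rest).splitOn '.'
          = if c = '.' then [] :: rest.splitOn '.'
            else (rest.splitOn '.').modifyHead (List.cons c) := by
        by_cases h : c = '.'
        · simp [List.splitOn, List.splitOnP_cons, h]
        · simp [List.splitOn, List.splitOnP_cons, h]
      by_cases hdot : c = '.'
      · -- current char is the separator: never a match start
        subst hdot
        have hcap : pvCapsA.contains '.' = false := by decide
        obtain ⟨q, qs, hq⟩ : ∃ q qs, rest.splitOn '.' = q :: qs := by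
          cases h : rest.splitOn '.' with
          | nil => exact absurd h (pvSplitOn_ne_nil rest)
          | cons q qs => exact ⟨q, qs, rfl⟩
        have hgo : pvGoChar ('.' :: rest) prev = '.' :: pvGoChar rest (some '.') := by
          match rest with
          | [] => rfl
          | d :: rest' => rw [pvGoChar, if_neg (by rw [hcap]; simp)]
        rw [hgo, ih rest.length (by simp [← hn]) rest (some '.') rfl]
        rw [hsplit, if_pos rfl, hq]
        show _ = [] ++ (if pvMatchEnd prev [] then ' ' else '.') :: pvJoinM (some '.') (q :: qs)
        simp [pvMatchEnd]
      · -- current char is not the separator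
        obtain ⟨p, ps, hp⟩ : ∃ p ps, rest.splitOn '.' = p :: ps := by
          cases h : rest.splitOn '.' with
          | nil => exact absurd h (pvSplitOn_ne_nil rest)
          | cons p ps => exact ⟨p, ps, rfl⟩
        have hs : (c :: rest).splitOn '.' = (c :: p) :: ps := by
          rw [hsplit, if_neg hdot, hp]; rfl
        match rest with
        | [] =>
          -- single char: splitOn [] = [[]]
          have : ([] : List Char).splitOn '.' = [[]] := List.splitOn_nil '.'
          rw [this] at hp
          injection hp with hp1 hp2
          rw [hs, ← hp1, ← hp2]
          rfl
        | d :: rest' =>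
          by_cases hm : (pvCapsA.contains c && (d == '.') && !pvCapOpt prev) = true
          · -- match: d = '.', so p = [] and rest' supplies the later parts
            have hd' : d = '.' := by
              simp only [Bool.and_eq_true, beq_iff_eq] at hm; exact hm.1.2
            subst hd'
            have hps : ('.' :: rest').splitOn '.' = [] :: rest'.splitOn '.' := by
              simp [List.splitOn, List.splitOnP_cons]
            rw [hps] at hp
            injection hp with hp1 hp2
            obtain ⟨q, qs, hq⟩ : ∃ q qs, rest'.splitOn '.' = q :: qs := by
              cases h : rest'.splitOn '.' with
              | nil => exact absurd h (pvSplitOn_ne_nil rest')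
              | cons q qs => exact ⟨q, qs, rfl⟩
            rw [pvGoChar, if_pos hm]
            rw [ih rest'.length (by simp [← hn]) rest' (some '.') rfl]
            rw [hs, ← hp1, ← hp2, hq]
            show _ = [c] ++ (if pvMatchEnd prev [c] then ' ' else '.') :: pvJoinM (some '.') (q :: qs)
            have : pvMatchEnd prev [c] = true := by
              show (pvCapsA.contains c && !pvCapOpt prev) = true
              simp only [Bool.and_eq_true] at hm ⊢
              exact ⟨hm.1.1, hm.2⟩
            rw [this]; simp
          · -- no match: copy c, prev becomes c
            rw [pvGoChar, if_neg hm]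
            rw [ih (d :: rest').length (by simp [← hn]) (d :: rest') (some c) rfl]
            rw [hs, hp]
            -- goal: pvJoinM (some c) (p :: ps) appears with head p; relate to (c :: p) :: ps
            cases ps with
            | nil => show c :: p = (c :: p); rfl
            | cons q qs =>
              show c :: (p ++ (if pvMatchEnd (some c) p then ' ' else '.') :: pvJoinM (some '.') (q :: qs))
                  = (c :: p) ++ (if pvMatchEnd prev (c :: p) then ' ' else '.') :: pvJoinM (some '.') (q :: qs)
              have hsep : pvMatchEnd (some c) p = pvMatchEnd prev (c :: p) := by
                cases p with
                | nil =>
                  -- p = [] means d = '.': the head of rest's split is empty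
                  have hd' : d = '.' := by
                    by_contra hne
                    have hmh : (d :: rest').splitOn '.' = ((rest'.splitOn '.').modifyHead (List.cons d)) := by
                      simp [List.splitOn, List.splitOnP_cons, hne]
                    obtain ⟨q', qs', hq'⟩ : ∃ q' qs', rest'.splitOn '.' = q' :: qs' := by
                      cases h : rest'.splitOn '.' with
                      | nil => exact absurd h (pvSplitOn_ne_nil rest')
                      | cons q' qs' => exact ⟨q', qs', rfl⟩
                    rw [hmh, hq'] at hp
                    injection hp with hp1 _
                    exact (List.cons_ne_nil d q') hp1
                  -- then no-match says ¬(cap c ∧ ¬capOpt prev)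
                  subst hd'
                  have hmf : (pvCapsA.contains c && ('.' == '.') && !pvCapOpt prev) = false :=
                    Bool.eq_false_iff.mpr hm
                  show (false : Bool) = (pvCapsA.contains c && !pvCapOpt prev)
                  simpa using hmf.symm
                | cons c' p' => rfl
              rw [hsep]; simp

-- ---- Step 3: pvJoinM with a non-capital prev is Source B's pvJoinB. ----

-- For a segment of length ≥ 2 the entry character is irrelevant and the decision is
-- Source B's last/second-to-last test.
lemma pvMatchEnd_long (n : Nat) : ∀ (p : List Char) (c c' : Char) (prev : Option Char),
    p.length = n →
    pvMatchEnd prev (c :: c' :: p)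
      = (pvCapsA.contains ((c :: c' :: p).getD ((c :: c' :: p).length - 1) ' ')
         && !pvCapsA.contains ((c :: c' :: p).getD ((c :: c' :: p).length - 2) ' ')) := by
  induction n using Nat.strong_induction_on with
  | _ n ih =>
    intro p c c' prev hn
    match p with
    | [] => rfl
    | c'' :: p' =>
      have step : pvMatchEnd prev (c :: c' :: c'' :: p') = pvMatchEnd (some c) (c' :: c'' :: p') := rfl
      rw [step, ih p'.length (by simp [← hn]) p' c' c'' (some c) rfl]
      have h1 : (c :: c' :: c'' :: p').getD ((c :: c' :: c'' :: p').length - 1) ' '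
          = (c' :: c'' :: p').getD ((c' :: c'' :: p').length - 1) ' ' := by
        simp
      have h2 : (c :: c' :: c'' :: p').getD ((c :: c' :: c'' :: p').length - 2) ' '
          = (c' :: c'' :: p').getD ((c' :: c'' :: p').length - 2) ' ' := by
        show (c :: c' :: c'' :: p').getD (p'.length + 1) ' ' = (c' :: c'' :: p').getD (p'.length) ' '
        simp
        rfl
      rw [h1, h2]

lemma pvJoinM_eq_joinB (parts : List (List Char)) : ∀ (prev : Option Char),
    pvCapOpt prev = false →
    pvJoinM prev parts = pvJoinB parts := by
  induction parts with
  | nil => intro prev _; rfl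
  | cons p ps ihp =>
    intro prev hprev
    cases ps with
    | nil => rfl
    | cons q qs =>
      show p ++ (if pvMatchEnd prev p then ' ' else '.') :: pvJoinM (some '.') (q :: qs)
          = p ++ pvSepB p :: pvJoinB (q :: qs)
      have hrec : pvJoinM (some '.') (q :: qs) = pvJoinB (q :: qs) :=
        ihp (some '.') (by decide)
      have hsep : (if pvMatchEnd prev p then ' ' else '.') = pvSepB p := by
        unfold pvSepB
        rw [show pvCapsB = pvCapsA from rfl]
        match p with
        | [] => simp [pvMatchEnd]
        | [c] =>
          show (if (pvCapsA.contains c && !pvCapOpt prev) then ' ' else '.') = _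
          rw [hprev]
          simp
        | c :: c' :: p' =>
          rw [pvMatchEnd_long p'.length p' c c' prev rfl]
          have hlen : ¬ ((c :: c' :: p').length == 1) = true := by simp
          have hne : decide ((c :: c' :: p') ≠ []) = true := by simp
          rw [hne]
          cases hA : pvCapsA.contains ((c :: c' :: p').getD ((c :: c' :: p').length - 1) ' ') <;>
            cases hB : pvCapsA.contains ((c :: c' :: p').getD ((c :: c' :: p').length - 2) ' ') <;>
              simp
      rw [hrec, hsep]

-- ===== VERDICT (by name: the statement is the Claim_ definition above) =====
theorem process_initials_spec : Claim_equal_process_initials := by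
  intro name _
  unfold Spec_process_initials process_initials process_initials_alt
  by_cases h : PySem.Str.len name ≤ 1
  · rw [if_pos h, if_pos h]
  · rw [if_neg h, if_neg h]
    rw [pvLoopA_eq_goChar (name.toList.length) name.toList 0 [] rfl]
    rw [show pvPrevAt name.toList 0 = none from rfl, List.drop_zero]
    rw [pvGoChar_eq_joinM name.toList.length name.toList none rfl]
    rw [pvJoinM_eq_joinB _ none (by decide)]
    rfl
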